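-- pv_equiv track=rewrite | github.com/michellab/BioSimSpace | python/BioSimSpace/Protocol/_config.py | _amber_mask_from_indices
-- ===== SOURCE A (Python) =====
-- import itertools as _it
--
-- def _amber_mask_from_indices(atom_idxs):
--     """Internal helper function to create an AMBER restraint mask from a
--        list of atom indices.
--
--        Parameters
--        ----------
--
--        atom_idxs : [int]
--            A list of atom indices.
--
--        Returns
--        -------
--
--        restraint_mask : str
--            The AMBER restraint mask.
--     """
--     # AMBER has a restriction on the number of characters in the restraint
--     # mask (not documented) so we can't just use comma-separated atom
--     # indices. Instead we loop through the indices and use hyphens to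
--     # separate contiguous blocks of indices, e.g. 1-23,34-47,...
--
--     if atom_idxs:
--         atom_idxs = sorted(list(set(atom_idxs)))
--         if not all(isinstance(x, int) for x in atom_idxs):
--             raise TypeError("'atom_idxs' must be a list of 'int' types.")
--         groups = []
--         initial_idx = atom_idxs[0]
--         for prev_idx, curr_idx in _it.zip_longest(atom_idxs, atom_idxs[1:]):
--             if curr_idx != prev_idx + 1 or curr_idx is None:
--                 if initial_idx == prev_idx:
--                     groups += [str(initial_idx)]
--                 else:
--                     groups += [f"{initial_idx}-{prev_idx}"]
--                 initial_idx = curr_idx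
--         mask = "@" + ",".join(groups)
--     else:
--         mask = ""
--
--     return mask
-- ===== SOURCE B (Python) =====
-- import itertools as _it
--
-- def _amber_mask_from_indices(atom_idxs):
--     """Create an AMBER restraint mask from a list of atom indices."""
--     if not atom_idxs:
--         return ""
--     atom_idxs = sorted(set(atom_idxs))
--     if not all(isinstance(x, int) for x in atom_idxs):
--         raise TypeError("'atom_idxs' must be a list of 'int' types.")
--     groups = []
--     for _, g in _it.groupby(enumerate(atom_idxs), key=lambda p: p[1] - p[0]):
--         g = list(g)
--         first, last = g[0][1], g[-1][1]
--         groups.append(str(first) if first == last else f"{first}-{last}")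
--     return "@" + ",".join(groups)
-- ===== Notes on version B (the rewrite author's own statement) =====
-- stated objective: idiomatic
-- what changed: Replaces the explicit prev/curr zip_longest sentinel loop with the standard itertools.groupby-on-(value - index) idiom to collect runs of consecutive indices, formatting each run from its first and last element.
import Mathlib
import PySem

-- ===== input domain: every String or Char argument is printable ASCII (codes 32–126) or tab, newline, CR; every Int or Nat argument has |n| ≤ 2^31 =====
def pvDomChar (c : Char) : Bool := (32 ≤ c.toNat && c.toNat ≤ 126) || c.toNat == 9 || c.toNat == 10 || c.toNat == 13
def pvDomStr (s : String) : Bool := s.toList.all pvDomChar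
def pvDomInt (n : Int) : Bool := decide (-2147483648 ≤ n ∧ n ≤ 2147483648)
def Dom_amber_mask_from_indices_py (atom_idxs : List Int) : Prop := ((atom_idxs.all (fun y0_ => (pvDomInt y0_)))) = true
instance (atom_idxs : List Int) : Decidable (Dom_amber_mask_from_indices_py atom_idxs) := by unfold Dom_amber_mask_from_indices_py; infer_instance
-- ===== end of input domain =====

-- B replaces A's explicit prev/curr zip_longest sentinel loop by the groupby-on-(value - index)
-- idiom that collects runs of consecutive indices (idiomatic; same cost).
-- The `all(isinstance(x, int))` guard of both Pythons is vacuously true under the List Int type.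

-- ===== PORT A =====
-- exact value of itertools.zip_longest(s, s[1:]) (the first list is never shorter here)
def pvZipNext : List Int → List (Int × Option Int)
  | [] => []
  | [x] => [(x, none)]
  | x :: y :: rest => (x, some y) :: pvZipNext (y :: rest)

-- f"{initial_idx}" / f"{initial_idx}-{prev_idx}" where initial_idx may be None
def pvFmtA (initial : Option Int) (prev : Int) : String :=
  if initial = some prev then PySem.Int.toStr prev
  else (match initial with | some i => PySem.Int.toStr i | none => "None") ++ "-" ++ PySem.Int.toStr prev

-- the for-loop over zip_longest, state = (initial_idx, groups)
def pvLoopA : Option Int → List String → List (Int × Option Int) → List String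
  | _, groups, [] => groups
  | initial, groups, (prev, curr) :: rest =>
      if curr ≠ some (prev + 1) ∨ curr = none
      then pvLoopA curr (groups ++ [pvFmtA initial prev]) rest
      else pvLoopA initial groups rest

def amber_mask_from_indices_py (atom_idxs : List Int) : String :=
  if atom_idxs ≠ [] then
    let s := PySem.List.sorted (PySem.Set.ofList atom_idxs) (fun x => x) false
    match s with
    | [] => ""  -- unreachable: atom_idxs[0] would raise IndexError, but s is nonempty here
    | a :: _ => "@" ++ PySem.Str.join "," (pvLoopA (some a) [] (pvZipNext s))
  else ""

-- ===== PORT B =====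
def pvFmtB (first last : Int) : String :=
  if first = last then PySem.Int.toStr first
  else PySem.Int.toStr first ++ "-" ++ PySem.Int.toStr last

-- groupby(enumerate(s), key=p[1]-p[0]) on the sorted duplicate-free list groups maximal runs of
-- consecutive integers: (first, last) per run, formatted as the loop body does.
def pvRunsB : Int → Int → List Int → List String
  | first, last, [] => [pvFmtB first last]
  | first, last, y :: ys =>
      if y = last + 1 then pvRunsB first y ys
      else pvFmtB first last :: pvRunsB y y ys

def pvGroupsB : List Int → List String
  | [] => []
  | x :: xs => pvRunsB x x xs

def amber_mask_from_indices_py_alt (atom_idxs : List Int) : String :=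
  if atom_idxs = [] then ""
  else
    "@" ++ PySem.Str.join "," (pvGroupsB (PySem.List.sorted (PySem.Set.ofList atom_idxs) (fun x => x) false))

-- ===== PRECONDITION & SPEC =====
def Spec_amber_mask_from_indices_py (atom_idxs : List Int) (out : String) : Prop := out = amber_mask_from_indices_py_alt atom_idxs
instance (atom_idxs : List Int) (out : String) : Decidable (Spec_amber_mask_from_indices_py atom_idxs out) := by unfold Spec_amber_mask_from_indices_py; infer_instance

-- ===== CLAIM (what is proved, stated in full; the proofs are below) =====
def Claim_equal_amber_mask_from_indices_py : Prop := ∀ (atom_idxs : List Int), Dom_amber_mask_from_indices_py atom_idxs → Spec_amber_mask_from_indices_py atom_idxs (amber_mask_from_indices_py atom_idxs)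

-- ===== LEMMAS AND PROOFS =====

lemma pvFmtA_some (first prev : Int) : pvFmtA (some first) prev = pvFmtB first prev := by
  simp only [pvFmtA, pvFmtB, Option.some.injEq]
  split_ifs <;> simp_all

lemma pvLoopA_eq_runsB : ∀ (xs : List Int) (first x : Int) (acc : List String),
    pvLoopA (some first) acc (pvZipNext (x :: xs)) = acc ++ pvRunsB first x xs := by
  intro xs
  induction xs with
  | nil =>
      intro first x acc
      simp [pvZipNext, pvLoopA, pvRunsB, pvFmtA_some]
  | cons y ys ih =>
      intro first x acc
      simp only [pvZipNext, pvLoopA]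
      by_cases h : y = x + 1
      · subst h
        simp [ih, pvRunsB]
      · have hne : (some y ≠ some (x + 1) ∨ (some y : Option Int) = none) := by
          left; simpa using h
        simp only [if_pos hne, ih, pvRunsB, if_neg h, pvFmtA_some]
        simp

theorem amber_mask_from_indices_py_spec' (atom_idxs : List Int) :
    amber_mask_from_indices_py atom_idxs = amber_mask_from_indices_py_alt atom_idxs := by
  unfold amber_mask_from_indices_py amber_mask_from_indices_py_alt
  by_cases h : atom_idxs = []
  · simp [h]
  · simp only [h, ne_eq, not_false_eq_true, if_true]
    have hs : PySem.List.sorted (PySem.Set.ofList atom_idxs) (fun x => x) false ≠ [] := by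
      rw [ne_eq, PySem.List.sorted_eq_nil_iff]
      intro hnil
      rcases List.exists_cons_of_ne_nil h with ⟨a, t, rfl⟩
      have : a ∈ PySem.Set.ofList (a :: t) := by
        rw [PySem.Set.mem_ofList]; simp
      simp [hnil] at this
    rcases List.exists_cons_of_ne_nil hs with ⟨a, rest, heq⟩
    rw [heq]
    simp [pvLoopA_eq_runsB, pvGroupsB]

-- ===== VERDICT (by name: the statement is the Claim_ definition above) =====
theorem amber_mask_from_indices_py_spec : Claim_equal_amber_mask_from_indices_py := by
  intro atom_idxs _
  exact amber_mask_from_indices_py_spec' atom_idxs
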